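-- pv_equiv track=rewrite | github.com/HaorongYuan/f1tenth_car_ws | src/car_navigation/roboracer_china_2025/roboracer_china_2025/battle_fast2_node.py | filter_small_obstacles
-- ===== SOURCE A (Python) =====
-- def filter_small_obstacles(Left_obs, min_obstacle_size=2):
--     for i in range(int(len(Left_obs) / 2)):
--         if abs(Left_obs[2 * i] - Left_obs[2 * i + 1]) <= min_obstacle_size:
--             Left_obs[2 * i] = -1
--             Left_obs[2 * i + 1] = -1
--     Left_obs_temp = Left_obs
--     Left_obs = [x for x in Left_obs_temp if x != -1]
--     return Left_obs
-- ===== SOURCE B (Python) =====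
-- def filter_small_obstacles(Left_obs, min_obstacle_size=2):
--     # Single fused pass: mark small pairs in place (preserving A's mutation of
--     # Left_obs) while building the surviving-element output list directly.
--     res = []
--     n = len(Left_obs)
--     for i in range(n // 2):
--         a = Left_obs[2 * i]
--         b = Left_obs[2 * i + 1]
--         if abs(a - b) <= min_obstacle_size:
--             Left_obs[2 * i] = -1
--             Left_obs[2 * i + 1] = -1
--         else:
--             if a != -1:
--                 res.append(a)
--             if b != -1:
--                 res.append(b)
--     if n % 2 == 1 and Left_obs[n - 1] != -1:
--         res.append(Left_obs[n - 1])
--     return res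
-- ===== Notes on version B (the rewrite author's own statement) =====
-- stated objective: alternative
-- what changed: Fuses A's two passes (mark small pairs in place, then rescan filtering -1) into one loop over pairs that marks and emits surviving elements directly, handling the odd trailing element separately.
import Mathlib
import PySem

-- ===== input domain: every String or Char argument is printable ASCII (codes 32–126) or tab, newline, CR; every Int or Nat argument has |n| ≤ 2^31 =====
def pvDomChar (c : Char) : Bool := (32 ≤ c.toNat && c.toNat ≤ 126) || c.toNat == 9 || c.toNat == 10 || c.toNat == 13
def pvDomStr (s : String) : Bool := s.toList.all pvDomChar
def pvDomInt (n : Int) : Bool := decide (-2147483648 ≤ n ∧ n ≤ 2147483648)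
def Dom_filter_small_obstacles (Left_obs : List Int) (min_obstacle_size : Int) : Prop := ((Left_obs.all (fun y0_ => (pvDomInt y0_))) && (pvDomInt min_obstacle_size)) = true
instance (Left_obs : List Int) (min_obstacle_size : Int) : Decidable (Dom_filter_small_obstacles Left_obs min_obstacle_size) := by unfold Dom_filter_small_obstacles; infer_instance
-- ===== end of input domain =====

-- B fuses A's two passes (mark small pairs, then rescan dropping -1) into one loop over
-- pairs that emits surviving elements directly ('alternative', not faster). Equivalence is
-- about the RETURN value; A mutates Left_obs in place and Source B reproduces that mutation.

-- ===== PORT A =====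
-- loop body of A's for-loop: read the pair at (2i, 2i+1); if |a-b| <= min, set both to -1.
-- Indices produced by range(len//2) are always in range, so the `none` branch is a
-- totality guard only. int(len(L)/2) on a nonnegative length is Nat division by 2.
def stepA (min_obstacle_size : Int) (acc : List Int) (i : Nat) : List Int :=
  match acc[2 * i]?, acc[2 * i + 1]? with
  | some a, some b =>
      if |a - b| ≤ min_obstacle_size then (acc.set (2 * i) (-1)).set (2 * i + 1) (-1) else acc
  | _, _ => acc

def filter_small_obstacles (Left_obs : List Int) (min_obstacle_size : Int) : List Int :=
  let marked := (List.range (Left_obs.length / 2)).foldl (stepA min_obstacle_size) Left_obs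
  marked.filter (fun x => x != -1)

-- ===== PORT B =====
-- Source B's in-place marking of Left_obs never affects a later read (pair i is read before it
-- is written, and the odd trailing index n-1 is never written), so the port reads the
-- original list throughout.
def stepB (min_obstacle_size : Int) (Left_obs : List Int) (res : List Int) (i : Nat) : List Int :=
  match Left_obs[2 * i]?, Left_obs[2 * i + 1]? with
  | some a, some b =>
      if |a - b| ≤ min_obstacle_size then res
      else
        let res := if a != -1 then res ++ [a] else res
        if b != -1 then res ++ [b] else res
  | _, _ => res

def tailB (Left_obs : List Int) (res : List Int) : List Int :=
  if Left_obs.length % 2 = 1 then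
    match Left_obs[Left_obs.length - 1]? with
    | some x => if x != -1 then res ++ [x] else res
    | none => res
  else res

def filter_small_obstacles_alt (Left_obs : List Int) (min_obstacle_size : Int) : List Int :=
  tailB Left_obs ((List.range (Left_obs.length / 2)).foldl (stepB min_obstacle_size Left_obs) [])

-- ===== PRECONDITION & SPEC =====
def Spec_filter_small_obstacles (Left_obs : List Int) (min_obstacle_size : Int) (out : List Int) : Prop := out = filter_small_obstacles_alt Left_obs min_obstacle_size
instance (Left_obs : List Int) (min_obstacle_size : Int) (out : List Int) : Decidable (Spec_filter_small_obstacles Left_obs min_obstacle_size out) := by unfold Spec_filter_small_obstacles; infer_instance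

-- ===== CLAIM (what is proved, stated in full; the proofs are below) =====
def Claim_equal_filter_small_obstacles : Prop := ∀ (Left_obs : List Int) (min_obstacle_size : Int), Dom_filter_small_obstacles Left_obs min_obstacle_size → Spec_filter_small_obstacles Left_obs min_obstacle_size (filter_small_obstacles Left_obs min_obstacle_size)

-- ===== LEMMAS AND PROOFS =====

-- the common pairwise recursion both programs compute
def emitPair (m a b : Int) : List Int :=
  if |a - b| ≤ m then [] else (if a != -1 then [a] else []) ++ (if b != -1 then [b] else [])

def gRef (m : Int) : List Int → List Int
  | [] => []
  | [x] => if x != -1 then [x] else []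
  | a :: b :: rest => emitPair m a b ++ gRef m rest

-- A-side
theorem stepA_cons2 (m x y : Int) (L : List Int) (i : Nat) :
    stepA m (x :: y :: L) (i + 1) = x :: y :: stepA m L i := by
  have h1 : 2 * (i + 1) = (2 * i + 1) + 1 := by omega
  simp only [stepA, h1, List.getElem?_cons_succ, List.set_cons_succ]
  cases L[2 * i]? <;> cases L[2 * i + 1]? <;> first | rfl | (dsimp only; split_ifs <;> rfl)

theorem shiftA (m x y : Int) : ∀ (r : List Nat) (L : List Int),
    ((r.map (· + 1)).foldl (stepA m) (x :: y :: L)) = x :: y :: r.foldl (stepA m) L := by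
  intro r
  induction r with
  | nil => intro L; simp
  | cons i r ih => intro L; simp only [List.map_cons, List.foldl_cons, stepA_cons2, ih]

theorem markA_cons2 (m a b : Int) (rest : List Int) :
    (List.range ((a :: b :: rest).length / 2)).foldl (stepA m) (a :: b :: rest)
      = (if |a - b| ≤ m then -1 else a) :: (if |a - b| ≤ m then -1 else b)
          :: (List.range (rest.length / 2)).foldl (stepA m) rest := by
  have hlen : (a :: b :: rest).length / 2 = rest.length / 2 + 1 := by
    simp [List.length]; omega
  rw [hlen, List.range_succ_eq_map, List.foldl_cons]
  have h0 : stepA m (a :: b :: rest) 0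
      = (if |a - b| ≤ m then -1 else a) :: (if |a - b| ≤ m then -1 else b) :: rest := by
    simp only [stepA]
    split_ifs <;> simp_all
  rw [h0]
  split_ifs <;> exact shiftA m _ _ _ rest

theorem A_eq_g (m : Int) : ∀ L : List Int, filter_small_obstacles L m = gRef m L
  | [] => by simp [filter_small_obstacles, gRef]
  | [x] => by
      by_cases hx : x = -1 <;> simp [filter_small_obstacles, gRef, List.filter, hx]
  | a :: b :: rest => by
      have ih := A_eq_g m rest
      simp only [filter_small_obstacles] at ih ⊢
      rw [markA_cons2, gRef, emitPair]
      by_cases h : |a - b| ≤ m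
      · simp [h, ih]
      · by_cases ha : (a != -1) = true <;> by_cases hb : (b != -1) = true <;>
          simp [h, ha, hb, ih]

-- B-side
theorem stepB_append (m : Int) (L res : List Int) (i : Nat) :
    stepB m L res i = res ++ stepB m L [] i := by
  simp only [stepB]
  cases L[2 * i]? <;> cases L[2 * i + 1]? <;> simp <;> split_ifs <;> simp

theorem foldlB_append (m : Int) (L : List Int) :
    ∀ (r : List Nat) (init : List Int),
      r.foldl (stepB m L) init = init ++ r.foldl (stepB m L) [] := by
  intro r
  induction r with
  | nil => intro init; simp
  | cons i r ih =>
      intro init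
      simp only [List.foldl_cons]
      rw [stepB_append, ih, ih (stepB m L [] i), List.append_assoc]

theorem stepB_cons2 (m x y : Int) (L res : List Int) (i : Nat) :
    stepB m (x :: y :: L) res (i + 1) = stepB m L res i := by
  have h1 : 2 * (i + 1) = (2 * i + 1) + 1 := by omega
  simp only [stepB, h1, List.getElem?_cons_succ]

theorem shiftB (m x y : Int) : ∀ (r : List Nat) (L res : List Int),
    (r.map (· + 1)).foldl (stepB m (x :: y :: L)) res = r.foldl (stepB m L) res := by
  intro r
  induction r with
  | nil => intro L res; simp
  | cons i r ih => intro L res; simp only [List.map_cons, List.foldl_cons, stepB_cons2, ih]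

theorem stepB0 (m a b : Int) (rest : List Int) :
    stepB m (a :: b :: rest) [] 0 = emitPair m a b := by
  simp only [stepB, emitPair]
  split_ifs <;> simp_all

theorem coreB_cons2 (m a b : Int) (rest : List Int) :
    (List.range ((a :: b :: rest).length / 2)).foldl (stepB m (a :: b :: rest)) []
      = emitPair m a b ++ (List.range (rest.length / 2)).foldl (stepB m rest) [] := by
  have hlen : (a :: b :: rest).length / 2 = rest.length / 2 + 1 := by
    simp [List.length]; omega
  rw [hlen, List.range_succ_eq_map, List.foldl_cons, stepB0, shiftB, foldlB_append]

theorem tailB_cons2 (x y : Int) (L res : List Int) :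
    tailB (x :: y :: L) res = tailB L res := by
  simp only [tailB, List.length_cons]
  have hmod : (L.length + 1 + 1) % 2 = L.length % 2 := by omega
  rw [hmod]
  by_cases h : L.length % 2 = 1
  · have hpos : 1 ≤ L.length := by omega
    have hidx : L.length + 1 + 1 - 1 = (L.length - 1) + 1 + 1 := by omega
    rw [hidx]
    simp [List.getElem?_cons_succ, h]
  · simp [h]

theorem tailB_append (L res1 res2 : List Int) :
    tailB L (res1 ++ res2) = res1 ++ tailB L res2 := by
  simp only [tailB]
  split_ifs with h
  · cases hx : L[L.length - 1]? with
    | none => simp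
    | some x => by_cases hx1 : x = -1 <;> simp [hx1]
  · rfl

theorem B_eq_g (m : Int) : ∀ L : List Int, filter_small_obstacles_alt L m = gRef m L
  | [] => by simp [filter_small_obstacles_alt, tailB, gRef]
  | [x] => by
      simp [filter_small_obstacles_alt, tailB, gRef]
  | a :: b :: rest => by
      have ih := B_eq_g m rest
      simp only [filter_small_obstacles_alt] at ih ⊢
      rw [coreB_cons2, tailB_cons2, tailB_append, ih, gRef]

-- ===== VERDICT (by name: the statement is the Claim_ definition above) =====
theorem filter_small_obstacles_spec : Claim_equal_filter_small_obstacles := by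
  intro L m _
  unfold Spec_filter_small_obstacles
  rw [A_eq_g, B_eq_g]
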